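-- pv_equiv track=rewrite | github.com/BooRuleDie/pAlembic | helpers/database.py | has_DDL
-- ===== SOURCE A (Python) =====
-- def has_DDL(upgrade: str, downgrade: str) -> bool:
--     DDLs = ["CREATE", "ALTER", "DROP", "TRUNCATE", "RENAME"]
--
--     for DDL in DDLs:
--         if DDL in upgrade.upper():
--             return True
--
--         if DDL in downgrade.upper():
--             return True
--
--     return False
-- ===== SOURCE B (Python) =====
-- KEYWORDS = ("CREATE", "ALTER", "DROP", "TRUNCATE", "RENAME")
--
--
-- def has_DDL(upgrade: str, downgrade: str) -> bool:
--     # Aho-Corasick-style single left-to-right scan: the state is the longest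
--     # suffix of the text read so far that is a prefix of some keyword; a match
--     # is reported when a whole keyword becomes a suffix of that state.
--     def is_prefix_of_keyword(w: str) -> bool:
--         return any(k.startswith(w) for k in KEYWORDS)
--
--     def scan(text: str) -> bool:
--         state = ""
--         for ch in text.upper():
--             t = state + ch
--             while not is_prefix_of_keyword(t):
--                 t = t[1:]
--             if any(t.endswith(k) for k in KEYWORDS):
--                 return True
--             state = t
--         return False
--
--     return scan(upgrade) or scan(downgrade)
-- ===== Notes on version B (the rewrite author's own statement) =====
-- stated objective: alternative
-- what changed: Replaces per-keyword repeated substring searches with a single left-to-right automaton-style (KMP/Aho-Corasick) scan of each string whose state is the longest suffix of the text read so far that is a prefix of some keyword, reporting a match when a keyword becomes a suffix of the state.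
import Mathlib
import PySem

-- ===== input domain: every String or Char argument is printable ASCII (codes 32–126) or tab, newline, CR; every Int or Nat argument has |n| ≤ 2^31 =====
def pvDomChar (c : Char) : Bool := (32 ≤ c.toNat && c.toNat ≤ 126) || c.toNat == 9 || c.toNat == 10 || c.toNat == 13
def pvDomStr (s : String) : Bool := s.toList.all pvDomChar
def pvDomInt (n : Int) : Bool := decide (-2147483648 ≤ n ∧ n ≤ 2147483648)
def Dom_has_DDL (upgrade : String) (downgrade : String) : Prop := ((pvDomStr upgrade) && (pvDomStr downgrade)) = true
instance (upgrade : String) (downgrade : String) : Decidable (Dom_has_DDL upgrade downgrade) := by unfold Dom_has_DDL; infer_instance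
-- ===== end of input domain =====

-- B replaces A's per-keyword substring searches with a single automaton-style scan of each
-- string whose state is the longest suffix read so far that is a prefix of a keyword (alternative).

-- ===== PORT A =====
-- the 'for DDL in DDLs' loop with its two early returns, step for step
def pvLoopA : List String → String → String → Bool
  | [], _, _ => false
  | ddl :: rest, up, down =>
    if PySem.Str.isIn ddl (PySem.Str.upper up) then true
    else if PySem.Str.isIn ddl (PySem.Str.upper down) then true
    else pvLoopA rest up down

def has_DDL (upgrade : String) (downgrade : String) : Bool :=
  pvLoopA ["CREATE", "ALTER", "DROP", "TRUNCATE", "RENAME"] upgrade downgrade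

-- ===== PORT B =====
def pvKeywords : List (List Char) :=
  ["CREATE".toList, "ALTER".toList, "DROP".toList, "TRUNCATE".toList, "RENAME".toList]

-- is_prefix_of_keyword: w is a prefix of some keyword
def pvIsPref (w : List Char) : Bool := pvKeywords.any (fun k => w.isPrefixOf k)

-- the 'while not is_prefix_of_keyword(t): t = t[1:]' loop
def pvShrink : List Char → List Char
  | [] => []
  | c :: rest => if pvIsPref (c :: rest) then c :: rest else pvShrink rest

-- the 'for ch in text.upper()' loop with its state and early return
def pvScanB : List Char → List Char → Bool
  | _, [] => false
  | state, c :: cs =>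
    let t := pvShrink (state ++ [c])
    if pvKeywords.any (fun k => k.isSuffixOf t) then true
    else pvScanB t cs

def has_DDL_alt (upgrade : String) (downgrade : String) : Bool :=
  pvScanB [] (PySem.Chars.upper upgrade.toList) || pvScanB [] (PySem.Chars.upper downgrade.toList)

-- ===== PRECONDITION & SPEC =====
def Spec_has_DDL (upgrade : String) (downgrade : String) (out : Bool) : Prop := out = has_DDL_alt upgrade downgrade
instance (upgrade : String) (downgrade : String) (out : Bool) : Decidable (Spec_has_DDL upgrade downgrade out) := by unfold Spec_has_DDL; infer_instance

-- ===== CLAIM (what is proved, stated in full; the proofs are below) =====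
def Claim_equal_has_DDL : Prop := ∀ (upgrade : String) (downgrade : String), Dom_has_DDL upgrade downgrade → Spec_has_DDL upgrade downgrade (has_DDL upgrade downgrade)

-- ===== LEMMAS AND PROOFS =====

theorem pvKeywords_ne_nil : ∀ k ∈ pvKeywords, k ≠ [] := by decide

-- appending on the right preserves the suffix relation
theorem pvSuffixApp {s p : List Char} (r : List Char) (h : s <:+ p) : s ++ r <:+ p ++ r := by
  rcases h with ⟨t, rfl⟩
  exact ⟨t, (List.append_assoc _ _ _).symm⟩

-- every list is empty or ends in a last element
theorem pvConcatCases (w : List Char) : w = [] ∨ ∃ w' d, w = w' ++ [d] := by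
  rcases List.eq_nil_or_concat w with h | ⟨w', d, h⟩
  · exact Or.inl h
  · exact Or.inr ⟨w', d, by simpa [List.concat_eq_append] using h⟩

-- pvIsPref is closed under taking prefixes
theorem pvIsPref_of_prefix {v w : List Char} (hvw : v <+: w) (hw : pvIsPref w = true) :
    pvIsPref v = true := by
  rcases List.any_eq_true.1 hw with ⟨k, hk, hpk⟩
  exact List.any_eq_true.2 ⟨k, hk, List.isPrefixOf_iff_prefix.2
    (hvw.trans (List.isPrefixOf_iff_prefix.1 hpk))⟩

-- pvShrink returns a suffix of its argument
theorem pvShrink_suffix (t : List Char) : pvShrink t <:+ t := by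
  induction t with
  | nil => simp [pvShrink]
  | cons c rest ih =>
    simp only [pvShrink]
    split_ifs with h
    · exact List.suffix_refl _
    · exact ih.trans (List.suffix_cons c rest)

-- pvShrink returns the LONGEST suffix that is a prefix of some keyword
theorem pvShrink_max {w t : List Char} (hw : w <:+ t) (hp : pvIsPref w = true) :
    w <:+ pvShrink t := by
  induction t with
  | nil => simpa [pvShrink] using hw
  | cons c rest ih =>
    simp only [pvShrink]
    split_ifs with h
    · exact hw
    · rcases List.suffix_cons_iff.1 hw with rfl | hw'
      · exact absurd hp (by simpa using h)
      · exact ih hw'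

-- a nonempty suffix of l ++ [c] drops its last element to a suffix of l
theorem suffix_concat_split {k l : List Char} {c : Char} (hk : k ≠ []) (h : k <:+ l ++ [c]) :
    ∃ k', k = k' ++ [c] ∧ k' <:+ l := by
  rcases h with ⟨u, hu⟩
  rcases pvConcatCases k with rfl | ⟨k', d, rfl⟩
  · exact absurd rfl hk
  · rw [← List.append_assoc] at hu
    obtain ⟨h1, h2⟩ := List.append_inj' hu rfl
    obtain rfl : d = c := by simpa using h2
    exact ⟨k', rfl, ⟨u, by simpa using h1⟩⟩

-- infix of l ++ [c] is an infix of l or a suffix of l ++ [c]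
theorem infix_concat_iff (k l : List Char) (c : Char) :
    k <:+: l ++ [c] ↔ k <:+: l ∨ k <:+ l ++ [c] := by
  constructor
  · rintro ⟨u, v, huv⟩
    rcases pvConcatCases v with rfl | ⟨v', d, rfl⟩
    · exact Or.inr ⟨u, by simpa using huv⟩
    · left
      rw [← List.append_assoc] at huv
      obtain ⟨h1, _⟩ := List.append_inj' huv rfl
      exact ⟨u, v', h1⟩
  · rintro (h | ⟨u, hu⟩)
    · exact h.trans ⟨[], [c], by simp⟩
    · exact ⟨u, [], by simpa using hu⟩

-- the automaton invariant: from a state that is the longest keyword-prefix suffix of the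
-- processed prefix p (which contains no match), the scan finds exactly the matches in p ++ cs
theorem pvScanB_invariant (cs : List Char) : ∀ (s p : List Char),
    s <:+ p → (∀ w, w <:+ p → pvIsPref w = true → w <:+ s) →
    (∀ k ∈ pvKeywords, ¬ k <:+: p) →
    (pvScanB s cs = true ↔ ∃ k ∈ pvKeywords, k <:+: p ++ cs) := by
  induction cs with
  | nil =>
    intro s p _ _ hclean
    simp only [pvScanB, List.append_nil, Bool.false_eq_true, false_iff]
    rintro ⟨k, hk, hinf⟩
    exact hclean k hk hinf
  | cons c cs ih =>
    intro s p hs hmax hclean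
    simp only [pvScanB]
    -- key fact: for a keyword k, k <:+ pvShrink (s ++ [c]) ↔ k <:+ p ++ [c]
    have key : ∀ k ∈ pvKeywords, (k <:+ pvShrink (s ++ [c]) ↔ k <:+ p ++ [c]) := by
      intro k hk
      constructor
      · intro h
        exact h.trans ((pvShrink_suffix _).trans (pvSuffixApp [c] hs))
      · intro h
        rcases suffix_concat_split (pvKeywords_ne_nil k hk) h with ⟨k', rfl, hk'p⟩
        have hkpref : pvIsPref (k' ++ [c]) = true :=
          List.any_eq_true.2 ⟨k' ++ [c], hk, List.isPrefixOf_iff_prefix.2 (List.prefix_refl _)⟩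
        have hk's : k' <:+ s := hmax k' hk'p (pvIsPref_of_prefix ⟨[c], rfl⟩ hkpref)
        exact pvShrink_max (pvSuffixApp [c] hk's) hkpref
    split_ifs with hmatch
    · -- a keyword is a suffix of the new state, hence of p ++ [c], hence an infix of p ++ c :: cs
      rcases List.any_eq_true.1 hmatch with ⟨k, hk, hsfx⟩
      have hkp : k <:+ p ++ [c] := (key k hk).1 (List.isSuffixOf_iff_suffix.1 hsfx)
      simp only [true_iff]
      refine ⟨k, hk, hkp.isInfix.trans (List.IsPrefix.isInfix ⟨cs, by simp⟩)⟩
    · -- no match yet: recurse with the new state and processed prefix p ++ [c]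
      have hnew : ∀ k ∈ pvKeywords, ¬ k <:+ p ++ [c] := by
        intro k hk hkp
        exact hmatch (List.any_eq_true.2 ⟨k, hk,
          List.isSuffixOf_iff_suffix.2 ((key k hk).2 hkp)⟩)
      have hrec := ih (pvShrink (s ++ [c])) (p ++ [c])
        ((pvShrink_suffix _).trans (pvSuffixApp [c] hs))
        (by
          intro w hw hwp
          rcases pvConcatCases w with rfl | ⟨w', d, rfl⟩
          · exact List.nil_suffix
          · rcases suffix_concat_split (by simp) hw with ⟨w2, heq, hw2⟩
            obtain ⟨rfl, hdc⟩ := List.append_inj' heq rfl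
            have hdc' : c = d := by simpa using hdc.symm
            subst hdc'
            have hw's : w' <:+ s := hmax w' hw2 (pvIsPref_of_prefix ⟨[c], rfl⟩ hwp)
            exact pvShrink_max (pvSuffixApp [c] hw's) hwp)
        (by
          intro k hk hinf
          rcases (infix_concat_iff k p c).1 hinf with h | h
          · exact hclean k hk h
          · exact hnew k hk h)
      rw [hrec]
      constructor
      · rintro ⟨k, hk, h⟩; exact ⟨k, hk, by simpa using h⟩
      · rintro ⟨k, hk, h⟩; exact ⟨k, hk, by simpa using h⟩

-- B's scan from the initial state finds exactly the keywords occurring as an infix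
theorem pvScanB_eq_true_iff (cs : List Char) :
    pvScanB [] cs = true ↔ ∃ k ∈ pvKeywords, k <:+: cs := by
  have := pvScanB_invariant cs [] []
    (List.suffix_refl _)
    (by intro w hw _; obtain rfl := List.suffix_nil.1 hw; exact List.nil_suffix)
    (by intro k hk hinf; exact pvKeywords_ne_nil k hk (List.eq_nil_of_infix_nil hinf))
  simpa using this

-- A's loop returns true exactly when some keyword is in either uppercased string
theorem pvLoopA_eq_true_iff (ks : List String) (up down : String) :
    pvLoopA ks up down = true ↔
      ∃ k ∈ ks, k.toList <:+: (PySem.Str.upper up).toList ∨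
                k.toList <:+: (PySem.Str.upper down).toList := by
  induction ks with
  | nil => simp [pvLoopA]
  | cons ddl rest ih =>
    simp only [pvLoopA]
    split_ifs with h1 h2
    · simp only [true_iff]
      exact ⟨ddl, by simp, Or.inl ((PySem.Str.isIn_iff_infix _ _).1 h1)⟩
    · simp only [true_iff]
      exact ⟨ddl, by simp, Or.inr ((PySem.Str.isIn_iff_infix _ _).1 h2)⟩
    · rw [ih]
      constructor
      · rintro ⟨k, hk, hkor⟩; exact ⟨k, List.mem_cons_of_mem _ hk, hkor⟩
      · rintro ⟨k, hk, hkor⟩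
        rcases List.mem_cons.1 hk with rfl | hk'
        · rcases hkor with h | h
          · exact absurd ((PySem.Str.isIn_iff_infix _ _).2 h) h1
          · exact absurd ((PySem.Str.isIn_iff_infix _ _).2 h) h2
        · exact ⟨k, hk', hkor⟩

theorem pvKeywords_eq_map : pvKeywords =
    (["CREATE", "ALTER", "DROP", "TRUNCATE", "RENAME"] : List String).map String.toList := by
  decide

-- ===== VERDICT (by name: the statement is the Claim_ definition above) =====
theorem has_DDL_spec : Claim_equal_has_DDL := by
  intro up down _
  show has_DDL up down = has_DDL_alt up down
  rw [Bool.eq_iff_iff]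
  unfold has_DDL has_DDL_alt
  rw [pvLoopA_eq_true_iff, Bool.or_eq_true, pvScanB_eq_true_iff, pvScanB_eq_true_iff,
    pvKeywords_eq_map]
  have hup : (PySem.Str.upper up).toList = PySem.Chars.upper up.toList := by
    simp [PySem.Str.toList_upper]
  have hdown : (PySem.Str.upper down).toList = PySem.Chars.upper down.toList := by
    simp [PySem.Str.toList_upper]
  rw [← hup, ← hdown]
  constructor
  · rintro ⟨k, hk, h | h⟩
    · exact Or.inl ⟨k.toList, List.mem_map_of_mem hk, h⟩
    · exact Or.inr ⟨k.toList, List.mem_map_of_mem hk, h⟩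
  · rintro (⟨kc, hkc, h⟩ | ⟨kc, hkc, h⟩) <;>
      · obtain ⟨k, hk, rfl⟩ := List.mem_map.1 hkc
        exact ⟨k, hk, by first | exact Or.inl h | exact Or.inr h⟩
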